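-- pv_equiv track=rewrite | github.com/ryusemin/Algomon | PGS/Part04/SoHyun/L3_150367.py | solution
-- ===== SOURCE A (Python) =====
-- def search(number):
--     l = len(number)
--     if l == 1 or '1' not in number or '0' not in number:
--         return True
--
--     mid = l // 2
--     if number[mid] == '0':
--         return False
--
--     return search(number[:mid]) and search(number[mid+1:])
--
-- def solution(numbers):
--     bin_numbers = [bin(x)[2:] for x in numbers]
--     bin_lst = [2**x - 1 for x in range(50)]
--     answer = list()
--
--     for num in bin_numbers:
--         l = len(num)
--         for n in bin_lst:
--             if n >= l:
--                 num = '0' * (n-l) + num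
--                 break
--         answer.append(1 if search(num) else 0)
--
--     return answer
-- ===== SOURCE B (Python) =====
-- def _go(s, lo, size):
--     # returns (ok, has-'1') for the subtree stored in-order at s[lo:lo+size]
--     if size <= 1:
--         return True, s[lo] == '1'
--     half = size // 2
--     okL, h1L = _go(s, lo, half)
--     okR, h1R = _go(s, lo + half + 1, half)
--     c = s[lo + half]
--     return (okL and okR and not (c == '0' and (h1L or h1R)),
--             c == '1' or h1L or h1R)
--
-- def solution(numbers):
--     answer = []
--     for x in numbers:
--         num = bin(x)[2:]
--         l = len(num)
--         n = (1 << l.bit_length()) - 1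
--         s = '0' * (n - l) + num
--         ok, _ = _go(s, 0, n)
--         answer.append(1 if ok else 0)
--     return answer
-- ===== Notes on version B (the rewrite author's own statement) =====
-- stated objective: alternative
-- what changed: A checks each padded binary string by a top-down recursion that slices the string and re-scans it for '0'/'1' at every level; B makes a single bottom-up pass over the in-order heap array, computing (valid, subtree-contains-'1') per node with index arithmetic and no slicing or substring scans, and computes the padded length by bit_length instead of scanning a precomputed list of 2**x-1 values.
import Mathlib
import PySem

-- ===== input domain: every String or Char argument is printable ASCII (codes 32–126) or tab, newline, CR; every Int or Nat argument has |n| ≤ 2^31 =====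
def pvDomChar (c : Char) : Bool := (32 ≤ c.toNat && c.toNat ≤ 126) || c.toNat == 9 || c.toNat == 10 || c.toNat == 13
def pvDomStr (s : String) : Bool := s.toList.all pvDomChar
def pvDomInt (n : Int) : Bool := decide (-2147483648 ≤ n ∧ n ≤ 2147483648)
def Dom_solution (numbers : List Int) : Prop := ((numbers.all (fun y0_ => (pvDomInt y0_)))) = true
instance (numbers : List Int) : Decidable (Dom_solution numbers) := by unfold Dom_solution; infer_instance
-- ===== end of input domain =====

-- B replaces A's top-down recursion (which re-scans and re-slices the string at every level)
-- by one bottom-up pass over the in-order heap array computing (ok, subtree-has-'1') per node.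

-- ===== PORT A =====
-- search(number): recursion with slicing; '1' in number / '0' in number are substring tests.
def searchA (number : List Char) : Bool :=
  if h : number.length = 1 ∨ PySem.Chars.isIn ['1'] number = false ∨ PySem.Chars.isIn ['0'] number = false then
    true
  else
    let mid := number.length / 2
    if PySem.List.pyGetD number (mid : Int) ' ' = '0' then false   -- number[mid]: mid is in range here (number is mixed, so nonempty)
    else
      searchA (PySem.List.slice number none (some (mid : Int))) &&
      searchA (PySem.List.slice number (some ((mid : Int) + 1)) none)
termination_by number.length
decreasing_by
  · have hne : number ≠ [] := by
      intro hnil; subst hnil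
      exact h (Or.inr (Or.inr (by decide)))
    rw [PySem.List.slice_to_natCast]
    have := List.length_pos_iff.mpr hne
    simp only [List.length_take]
    omega
  · have hne : number ≠ [] := by
      intro hnil; subst hnil
      exact h (Or.inr (Or.inr (by decide)))
    have hc : ((number.length / 2 : Nat) : Int) + 1 = (((number.length / 2 + 1 : Nat) : Int)) := by push_cast; ring
    rw [hc, PySem.List.slice_from_natCast]
    have := List.length_pos_iff.mpr hne
    simp only [List.length_drop]
    omega

def solution (numbers : List Int) : List Int :=
  let bin_numbers := numbers.map (fun x => PySem.List.slice (PySem.Int.toBinChars0b x) (some 2) none)  -- bin(x)[2:]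
  let bin_lst := (PySem.List.pyRange 0 50 1).map (fun x => (2:Int) ^ x.toNat - 1)   -- [2**x - 1 for x in range(50)]; x ≥ 0 so 2**x = 2^x.toNat
  bin_numbers.foldl (fun answer num =>
    let l : Int := PySem.List.len num
    -- for n in bin_lst: if n >= l: num = '0'*(n-l) + num; break   (first hit, else num unchanged)
    let num' := match bin_lst.find? (fun n => decide (l ≤ n)) with
      | some n => List.replicate (n - l).toNat '0' ++ num    -- '0'*(n-l): negative repeat is empty, toNat matches
      | none => num
    answer ++ [if searchA num' then (1:Int) else 0]) []

-- ===== PORT B =====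
-- _go(s, lo, size): one bottom-up pass; returns (ok, subtree contains '1').
def goB (s : List Char) (lo size : Nat) : Bool × Bool :=
  if size ≤ 1 then
    (true, PySem.List.pyGetD s (lo : Int) ' ' == '1')   -- s[lo]: in range at every actual call
  else
    let half := size / 2
    let L := goB s lo half
    let R := goB s (lo + half + 1) half
    let c := PySem.List.pyGetD s ((lo + half : Nat) : Int) ' '
    (L.1 && R.1 && !(c == '0' && (L.2 || R.2)), c == '1' || L.2 || R.2)
termination_by size
decreasing_by
  · exact Nat.div_lt_self (by omega) (by omega)
  · exact Nat.div_lt_self (by omega) (by omega)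

def solution_alt (numbers : List Int) : List Int :=
  numbers.map (fun x =>
    let num := PySem.List.slice (PySem.Int.toBinChars0b x) (some 2) none   -- bin(x)[2:]
    let l := num.length
    let n := (1 <<< PySem.Int.bitLength (l : Int)) - 1                     -- (1 << l.bit_length()) - 1; n ≥ l so Nat subtraction below is exact
    let s := List.replicate (n - l) '0' ++ num
    if (goB s 0 n).1 then (1 : Int) else 0)




-- ===== PRECONDITION & SPEC =====
def Spec_solution (numbers : List Int) (out : List Int) : Prop := out = solution_alt numbers
instance (numbers : List Int) (out : List Int) : Decidable (Spec_solution numbers out) := by unfold Spec_solution; infer_instance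

-- ===== CLAIM (what is proved, stated in full; the proofs are below) =====
def Claim_equal_solution : Prop := ∀ (numbers : List Int), Dom_solution numbers → Spec_solution numbers (solution numbers)

-- ===== LEMMAS AND PROOFS =====

def cAt (s : List Char) (i : Nat) : Char := s[i]?.getD ' '   -- s[i] as read by both ports (in range wherever used)

lemma isIn_single (c : Char) (s : List Char) : PySem.Chars.isIn [c] s = decide (c ∈ s) := by
  by_cases h : c ∈ s
  · obtain ⟨l1, l2, rfl⟩ := List.append_of_mem h
    have hinf : [c] <:+: l1 ++ c :: l2 := ⟨l1, l2, by simp⟩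
    simp [(PySem.Chars.isIn_iff_infix _ _).2 hinf, h]
  · have hinf : ¬ [c] <:+: s := fun hin => h (hin.subset (by simp))
    simp [(PySem.Chars.isIn_eq_false_iff _ _).2 hinf, h]

lemma searchA_len1 {s : List Char} (h : s.length = 1) : searchA s = true := by
  rw [searchA]; simp [h]

lemma searchA_no1 {s : List Char} (h : '1' ∉ s) : searchA s = true := by
  rw [searchA, dif_pos]
  exact Or.inr (Or.inl (by rw [isIn_single]; simpa using h))

lemma searchA_no0 {s : List Char} (h : '0' ∉ s) : searchA s = true := by
  rw [searchA, dif_pos]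
  exact Or.inr (Or.inr (by rw [isIn_single]; simpa using h))

lemma searchA_mixed {s : List Char} (h1 : '1' ∈ s) (h0 : '0' ∈ s) (hlen : s.length ≠ 1) :
    searchA s = if cAt s (s.length/2) = '0' then false
                else searchA (s.take (s.length/2)) && searchA (s.drop (s.length/2 + 1)) := by
  rw [searchA, dif_neg]
  · have hc : ((s.length/2 : Nat) : Int) + 1 = (((s.length/2 + 1 : Nat) : Int)) := by push_cast; ring
    simp only [hc, PySem.List.slice_to_natCast, PySem.List.slice_from_natCast,
      PySem.List.pyGetD_natCast]
    simp [cAt]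
    rfl
  · rintro (h | h | h)
    · exact hlen h
    · rw [isIn_single] at h; simp [h1] at h
    · rw [isIn_single] at h; simp [h0] at h

lemma goB_one (s : List Char) (lo : Nat) : goB s lo 1 = (true, cAt s lo == '1') := by
  rw [goB]; simp [cAt]


lemma goB_step (s : List Char) (lo size : Nat) (h : 2 ≤ size) :
    goB s lo size =
      ((goB s lo (size/2)).1 && (goB s (lo + size/2 + 1) (size/2)).1 &&
         !((cAt s (lo + size/2) == '0') && ((goB s lo (size/2)).2 || (goB s (lo + size/2 + 1) (size/2)).2)),
       (cAt s (lo + size/2) == '1') || (goB s lo (size/2)).2 || (goB s (lo + size/2 + 1) (size/2)).2) := by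
  rw [goB, if_neg (by omega)]
  have hcast : ((lo : Int) + ((size/2 : Nat) : Int)) = (((lo + size/2 : Nat)) : Int) := by push_cast; ring
  simp only [hcast, PySem.List.pyGetD_natCast]
  simp [cAt]

def win (s : List Char) (lo size : Nat) : List Char := (s.drop lo).take size

lemma length_win {s : List Char} {lo size : Nat} (h : lo + size ≤ s.length) : (win s lo size).length = size := by
  simp [win]; omega

lemma getD_win {s : List Char} {lo size i : Nat} (hi : i < size) (h : lo + size ≤ s.length) :
    cAt (win s lo size) i = cAt s (lo + i) := by
  simp [win, cAt, hi, List.getElem?_drop]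

lemma win_win_left {s : List Char} {lo size half : Nat} (h : half ≤ size) :
    win (win s lo size) 0 half = win s lo half := by
  simp [win, List.take_take, Nat.min_eq_left h]

lemma win_win_right {s : List Char} {lo size half : Nat} (h : half + 1 + half ≤ size) :
    win (win s lo size) (half + 1) half = win s (lo + half + 1) half := by
  simp only [win, List.drop_take, List.drop_drop, List.take_take]
  congr 1 <;> omega

lemma split3 {s : List Char} {half : Nat} (h : half < s.length) :
    s = s.take half ++ cAt s half :: s.drop (half+1) := by
  conv_lhs => rw [← List.take_append_drop half s]
  rw [List.drop_eq_getElem_cons h]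
  congr 2
  simp [cAt, List.getElem?_eq_getElem h]

lemma two_pow_succ_div (k : Nat) (hk : 1 ≤ k) : ((2:Nat)^(k+1) - 1) / 2 = 2^k - 1 := by
  have h2 : (2:Nat)^(k+1) = 2 * 2^k := by ring
  have h1 : 2 ≤ (2:Nat)^k := Nat.one_lt_two_pow_iff.mpr (by omega)
  omega

lemma goB_win : ∀ (k : Nat), 1 ≤ k → ∀ (lo : Nat) (s : List Char), lo + (2^k - 1) ≤ s.length →
    goB s lo (2^k - 1) = goB (win s lo (2^k - 1)) 0 (2^k - 1) := by
  intro k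
  induction k with
  | zero => omega
  | succ k ih =>
    intro _ lo s hlen
    by_cases hk : k = 0
    · subst hk
      rw [show (2:Nat)^1 - 1 = 1 from rfl] at *
      rw [goB_one, goB_one, getD_win (s:=s) (lo:=lo) (size:=1) (i:=0) (by omega) hlen, Nat.add_zero]
    · have hk1 : 1 ≤ k := by omega
      have h1 : 2 ≤ (2:Nat)^k := Nat.one_lt_two_pow_iff.mpr (by omega)
      have h2 : (2:Nat)^(k+1) = 2 * 2^k := by ring
      have hwlen : (win s lo (2^(k+1) - 1)).length = 2^(k+1) - 1 := length_win hlen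
      have e1 : goB s lo (2^k - 1) = goB (win s lo (2^k - 1)) 0 (2^k - 1) := ih hk1 lo s (by omega)
      have e2 : goB s (lo + (2^k - 1) + 1) (2^k - 1) = goB (win s (lo + (2^k - 1) + 1) (2^k - 1)) 0 (2^k - 1) :=
        ih hk1 _ s (by omega)
      have e1' : goB (win s lo (2^(k+1) - 1)) 0 (2^k - 1)
          = goB (win (win s lo (2^(k+1) - 1)) 0 (2^k - 1)) 0 (2^k - 1) :=
        ih hk1 0 (win s lo (2^(k+1) - 1)) (by omega)
      have e2' : goB (win s lo (2^(k+1) - 1)) ((2^k - 1) + 1) (2^k - 1)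
          = goB (win (win s lo (2^(k+1) - 1)) ((2^k - 1) + 1) (2^k - 1)) 0 (2^k - 1) :=
        ih hk1 _ (win s lo (2^(k+1) - 1)) (by omega)
      rw [win_win_left (by omega)] at e1'
      rw [win_win_right (by omega)] at e2'
      rw [goB_step s lo (2^(k+1) - 1) (by omega),
          goB_step (win s lo (2^(k+1) - 1)) 0 (2^(k+1) - 1) (by omega),
          two_pow_succ_div k hk1]
      simp only [Nat.zero_add]
      rw [getD_win (s:=s) (lo:=lo) (size:=2^(k+1) - 1) (i:=2^k - 1) (by omega) hlen]
      rw [e1, e2, e1', e2']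

lemma win_zero_take (s : List Char) (n : Nat) : win s 0 n = s.take n := by simp [win]

lemma win_drop_all {s : List Char} {a b : Nat} (h : s.length = a + b) :
    win s a b = s.drop a := by
  simp [win, List.length_drop]; omega

lemma goB_take {k : Nat} (hk : 1 ≤ k) {s : List Char} (h : 2^(k+1) - 1 ≤ s.length) :
    goB s 0 (2^k - 1) = goB (s.take (2^k - 1)) 0 (2^k - 1) := by
  have h1 : 2 ≤ (2:Nat)^k := Nat.one_lt_two_pow_iff.mpr (by omega)
  have h2 : (2:Nat)^(k+1) = 2 * 2^k := by ring
  have := goB_win k hk 0 s (by omega)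
  rwa [win_zero_take] at this

lemma goB_drop {k : Nat} (hk : 1 ≤ k) {s : List Char} (h : s.length = 2^(k+1) - 1) :
    goB s (2^k - 1 + 1) (2^k - 1) = goB (s.drop (2^k - 1 + 1)) 0 (2^k - 1) := by
  have h1 : 2 ≤ (2:Nat)^k := Nat.one_lt_two_pow_iff.mpr (by omega)
  have h2 : (2:Nat)^(k+1) = 2 * 2^k := by ring
  have := goB_win k hk (2^k - 1 + 1) s (by omega)
  rwa [win_drop_all (by omega)] at this

lemma goB_has1 : ∀ (k : Nat), 1 ≤ k → ∀ (s : List Char), s.length = 2^k - 1 →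
    (goB s 0 (2^k - 1)).2 = decide ('1' ∈ s) := by
  intro k
  induction k with
  | zero => omega
  | succ k ih =>
    intro _ s hlen
    by_cases hk : k = 0
    · subst hk
      obtain ⟨c, rfl⟩ := List.length_eq_one_iff.mp (by simpa using hlen)
      rw [show (2:Nat)^1 - 1 = 1 from rfl, goB_one]
      simp only [cAt, List.getElem?_singleton]
      by_cases hc : c = '1'
      · simp [hc]
      · simp [hc, Ne.symm hc]
    · have hk1 : 1 ≤ k := by omega
      have h1 : 2 ≤ (2:Nat)^k := Nat.one_lt_two_pow_iff.mpr (by omega)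
      have h2 : (2:Nat)^(k+1) = 2 * 2^k := by ring
      have htake : (s.take (2^k - 1)).length = 2^k - 1 := by simp; omega
      have hdrop : (s.drop (2^k - 1 + 1)).length = 2^k - 1 := by simp; omega
      rw [goB_step s 0 (2^(k+1) - 1) (by omega), two_pow_succ_div k hk1]
      simp only [Nat.zero_add]
      rw [goB_take hk1 (by omega), goB_drop hk1 hlen]
      rw [ih hk1 _ htake, ih hk1 _ hdrop]
      have hsplit : ('1' ∈ s) ↔ ('1' ∈ s.take (2^k - 1) ∨ '1' = cAt s (2^k - 1) ∨ '1' ∈ s.drop (2^k - 1 + 1)) := by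
        conv_lhs => rw [split3 (show 2^k - 1 < s.length by omega)]
        simp [List.mem_append]
      have hbeq : (cAt s (2^k - 1) == '1') = decide ('1' = cAt s (2^k - 1)) := by
        by_cases hx : cAt s (2^k - 1) = '1'
        · simp [hx]
        · simp [hx, Ne.symm hx]
      rw [hbeq]
      by_cases m1 : '1' = cAt s (2^k - 1) <;> by_cases m2 : '1' ∈ s.take (2^k - 1) <;>
        by_cases m3 : '1' ∈ s.drop (2^k - 1 + 1) <;>
        simp [m1, m2, m3, hsplit]

lemma goB_noc : ∀ (k : Nat), 1 ≤ k → ∀ (s : List Char), s.length = 2^k - 1 →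
    ('0' ∉ s ∨ '1' ∉ s) → (goB s 0 (2^k - 1)).1 = true := by
  intro k
  induction k with
  | zero => omega
  | succ k ih =>
    intro _ s hlen hm
    by_cases hk : k = 0
    · subst hk
      rw [show (2:Nat)^1 - 1 = 1 from rfl, goB_one]
    · have hk1 : 1 ≤ k := by omega
      have h1 : 2 ≤ (2:Nat)^k := Nat.one_lt_two_pow_iff.mpr (by omega)
      have h2 : (2:Nat)^(k+1) = 2 * 2^k := by ring
      have htake : (s.take (2^k - 1)).length = 2^k - 1 := by simp; omega
      have hdrop : (s.drop (2^k - 1 + 1)).length = 2^k - 1 := by simp; omega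
      have hmt : '0' ∉ s.take (2^k - 1) ∨ '1' ∉ s.take (2^k - 1) :=
        hm.imp (fun h hmem => h (List.mem_of_mem_take hmem)) (fun h hmem => h (List.mem_of_mem_take hmem))
      have hmd : '0' ∉ s.drop (2^k - 1 + 1) ∨ '1' ∉ s.drop (2^k - 1 + 1) :=
        hm.imp (fun h hmem => h (List.mem_of_mem_drop hmem)) (fun h hmem => h (List.mem_of_mem_drop hmem))
      rw [goB_step s 0 (2^(k+1) - 1) (by omega), two_pow_succ_div k hk1]
      simp only [Nat.zero_add]
      rw [goB_take hk1 (by omega), goB_drop hk1 hlen]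
      rw [ih hk1 _ htake hmt, ih hk1 _ hdrop hmd]
      rw [goB_has1 k hk1 _ htake, goB_has1 k hk1 _ hdrop]
      rcases hm with hm | hm
      · have hc : cAt s (2^k - 1) ≠ '0' := by
          intro hc
          apply hm
          rw [split3 (show 2^k - 1 < s.length by omega), ← hc]
          exact List.mem_append_right _ (List.mem_cons_self)
        simp [hc]
      · have hm2 : '1' ∉ s.take (2^k - 1) := fun h => hm (List.mem_of_mem_take h)
        have hm3 : '1' ∉ s.drop (2^k - 1 + 1) := fun h => hm (List.mem_of_mem_drop h)
        simp [hm2, hm3]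

lemma searchA_eq_goB : ∀ (k : Nat), 1 ≤ k → ∀ (s : List Char), s.length = 2^k - 1 →
    searchA s = (goB s 0 (2^k - 1)).1 := by
  intro k
  induction k with
  | zero => omega
  | succ k ih =>
    intro _ s hlen
    by_cases hk : k = 0
    · subst hk
      rw [show (2:Nat)^1 - 1 = 1 from rfl] at *
      rw [goB_one, searchA_len1 hlen]
    · have hk1 : 1 ≤ k := by omega
      have h1 : 2 ≤ (2:Nat)^k := Nat.one_lt_two_pow_iff.mpr (by omega)
      have h2 : (2:Nat)^(k+1) = 2 * 2^k := by ring
      have htake : (s.take (2^k - 1)).length = 2^k - 1 := by simp; omega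
      have hdrop : (s.drop (2^k - 1 + 1)).length = 2^k - 1 := by simp; omega
      by_cases hone : '1' ∈ s
      case neg =>
        rw [searchA_no1 hone, goB_noc (k+1) (by omega) s hlen (Or.inr hone)]
      by_cases hzero : '0' ∈ s
      case neg =>
        rw [searchA_no0 hzero, goB_noc (k+1) (by omega) s hlen (Or.inl hzero)]
      have hlen1 : s.length ≠ 1 := by omega
      rw [searchA_mixed hone hzero hlen1, hlen, two_pow_succ_div k hk1]
      rw [goB_step s 0 (2^(k+1) - 1) (by omega), two_pow_succ_div k hk1]
      simp only [Nat.zero_add]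
      rw [goB_take hk1 (by omega), goB_drop hk1 hlen]
      rw [goB_has1 k hk1 _ htake, goB_has1 k hk1 _ hdrop]
      rw [ih hk1 _ htake, ih hk1 _ hdrop]
      by_cases hc : cAt s (2^k - 1) = '0'
      · rw [if_pos hc]
        have hor : '1' ∈ s.take (2^k - 1) ∨ '1' ∈ s.drop (2^k - 1 + 1) := by
          have hone2 := hone
          rw [split3 (show 2^k - 1 < s.length by omega)] at hone2
          rcases List.mem_append.mp hone2 with h | h
          · exact Or.inl h
          · rcases List.mem_cons.mp h with h | h
            · rw [hc] at h; exact absurd h (by decide)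
            · exact Or.inr h
        rcases hor with h | h <;> simp [hc, h]
      · rw [if_neg hc]
        simp [hc]

lemma toDigitsCore_ne_nil : ∀ (f n : Nat) (l : List Char), n < f → Nat.toDigitsCore 2 f n l ≠ [] := by
  intro f
  induction f with
  | zero => intro n l h; omega
  | succ f ih =>
    intro n l hnf
    simp only [Nat.toDigitsCore]
    split
    · simp
    · next h =>
      have hn : 0 < n := by
        rcases Nat.eq_zero_or_pos n with h0 | h0
        · subst h0; simp at h
        · exact h0
      have hne0 : n / 2 ≠ 0 := by simpa using h
      apply ih
      omega

lemma toDigits_ne_nil (n : Nat) : Nat.toDigits 2 n ≠ [] := by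
  unfold Nat.toDigits
  exact toDigitsCore_ne_nil _ _ _ (Nat.lt_succ_self n)

lemma binA_eq (x : Int) :
    PySem.List.slice (PySem.Int.toBinChars0b x) (some 2) none
      = if x < 0 then 'b' :: Nat.toDigits 2 x.natAbs else Nat.toDigits 2 x.toNat := by
  rw [show PySem.List.slice (PySem.Int.toBinChars0b x) (some 2) none
        = (PySem.Int.toBinChars0b x).drop ((2:Int).toNat) from PySem.List.slice_from _ (by norm_num)]
  unfold PySem.Int.toBinChars0b
  split_ifs <;> simp

lemma binA_len (x : Int) (hx : x.natAbs ≤ 2^31) :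
    1 ≤ (PySem.List.slice (PySem.Int.toBinChars0b x) (some 2) none).length ∧
    (PySem.List.slice (PySem.Int.toBinChars0b x) (some 2) none).length ≤ 33 := by
  rw [binA_eq]
  split_ifs with h
  · have hne := toDigits_ne_nil x.natAbs
    have hlen := Nat.toDigits_length 2 x.natAbs 32 (by norm_num) (by omega)
    constructor
    · simp
    · simp only [List.length_cons]; omega
  · have hne := toDigits_ne_nil x.toNat
    have hlen := Nat.toDigits_length 2 x.toNat 32 (by norm_num) (by omega)
    constructor
    · exact Nat.one_le_iff_ne_zero.mpr (by simpa using hne)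
    · omega

lemma findPad (l : Nat) (h1 : 1 ≤ l) (h2 : l ≤ 33) :
    ((PySem.List.pyRange 0 50 1).map (fun y => (2:Int) ^ y.toNat - 1)).find? (fun n => decide ((l:Int) ≤ n))
      = some ((2:Int) ^ (PySem.Int.bitLength (l:Int)) - 1) := by
  interval_cases l <;> decide

lemma bitLength_pos {l : Nat} (h1 : 1 ≤ l) : 1 ≤ PySem.Int.bitLength (l:Int) := by
  by_contra hb
  have := PySem.Int.lt_two_pow_bitLength (l:Int)
  rw [Nat.eq_zero_of_not_pos hb] at this
  simp at this
  omega

lemma nat_lt_two_pow_bitLength (l : Nat) : l < 2 ^ PySem.Int.bitLength (l:Int) := by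
  have := PySem.Int.lt_two_pow_bitLength (l:Int)
  simpa using this

lemma elem_core (num : List Char) (hpos : 1 ≤ num.length) (hle : num.length ≤ 33) :
    (if searchA (match ((PySem.List.pyRange 0 50 1).map (fun y => (2:Int) ^ y.toNat - 1)).find? (fun n => decide (((num.length : Nat):Int) ≤ n)) with
        | some n => List.replicate ((n - ((num.length : Nat):Int)).toNat) '0' ++ num
        | none => num) then (1:Int) else 0)
    = (if (goB (List.replicate ((1 <<< PySem.Int.bitLength ((num.length : Nat):Int)) - 1 - num.length) '0' ++ num) 0 ((1 <<< PySem.Int.bitLength ((num.length : Nat):Int)) - 1)).1 then (1:Int) else 0) := by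
  have hbl1 := bitLength_pos hpos
  have hlt := nat_lt_two_pow_bitLength num.length
  rw [findPad _ hpos hle]
  have hcast : (((2:Int) ^ PySem.Int.bitLength ((num.length : Nat):Int) - 1) - ((num.length : Nat):Int)).toNat
      = 2 ^ PySem.Int.bitLength ((num.length : Nat):Int) - 1 - num.length := by
    have h2 : (((2:Nat) ^ PySem.Int.bitLength ((num.length : Nat):Int) : Nat) : Int)
        = (2:Int) ^ PySem.Int.bitLength ((num.length : Nat):Int) := by push_cast; ring
    omega
  rw [Nat.one_shiftLeft]
  dsimp only
  simp only [hcast]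
  have hs : (List.replicate (2 ^ PySem.Int.bitLength ((num.length : Nat):Int) - 1 - num.length) '0' ++ num).length
      = 2 ^ PySem.Int.bitLength ((num.length : Nat):Int) - 1 := by simp; omega
  rw [searchA_eq_goB _ hbl1 _ hs]

lemma solution_spec' : ∀ (numbers : List Int), Dom_solution numbers → solution numbers = solution_alt numbers := by
  intro numbers hdom
  unfold solution solution_alt
  dsimp only
  rw [PySem.List.foldl_append_singleton_eq_map]
  rw [List.map_map]
  apply List.map_congr_left
  intro x hx
  have hdx : pvDomInt x = true := by
    have := List.all_eq_true.mp hdom x hx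
    simpa using this
  have hxa : x.natAbs ≤ 2^31 := by
    unfold pvDomInt at hdx
    simp at hdx
    omega
  obtain ⟨hpos, hle⟩ := binA_len x hxa
  simp only [Function.comp, PySem.List.len_eq]
  exact elem_core _ hpos hle

-- ===== VERDICT (by name: the statement is the Claim_ definition above) =====
theorem solution_spec : Claim_equal_solution := by
  intro numbers hdom
  exact solution_spec' numbers hdom
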